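-- pv_equiv track=rewrite | github.com/lyonsno/auto-grader | scripts/narrator_reader.py | _history_groups_with_indices
-- ===== SOURCE A (Python) =====
-- def _history_groups_with_indices(
--     history_list: list[tuple[str, str, int | None]],
-- ) -> list[list[tuple[tuple[str, str, int | None], int]]]:
--     groups: list[list[tuple[tuple[str, str, int | None], int]]] = []
--     current_group: list[tuple[tuple[str, str, int | None], int]] = []
--     for idx, entry in enumerate(history_list):
--         if entry[0] == "header":
--             if current_group:
--                 groups.append(current_group)
--             current_group = [(entry, idx)]
--         else:
--             current_group.append((entry, idx))
--     if current_group: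
--         groups.append(current_group)
--     return groups
-- ===== SOURCE B (Python) =====
-- def _history_groups_with_indices(
--     history_list: list[tuple[str, str, int | None]],
-- ) -> list[list[tuple[tuple[str, str, int | None], int]]]:
--     pairs = [(entry, idx) for idx, entry in enumerate(history_list)]
--     return _go(pairs)
--
--
-- def _go(pairs):
--     # First pair always opens a group; the group runs up to (excluding) the
--     # next header, then recurse on the rest.
--     if not pairs:
--         return []
--     rest = pairs[1:]
--     k = next((j for j, p in enumerate(rest) if p[0][0] == "header"), len(rest))
--     return [[pairs[0]] + rest[:k]] + _go(rest[k:])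
-- ===== Notes on version B (the rewrite author's own statement) =====
-- stated objective: alternative
-- what changed: Replaces A's single accumulator loop (groups + mutable current_group with flush-on-header) by a recursive decomposition: enumerate once, then repeatedly split the pair list at the next header boundary (first element plus the run up to the next header forms a group) and recurse on the remainder.
import Mathlib
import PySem

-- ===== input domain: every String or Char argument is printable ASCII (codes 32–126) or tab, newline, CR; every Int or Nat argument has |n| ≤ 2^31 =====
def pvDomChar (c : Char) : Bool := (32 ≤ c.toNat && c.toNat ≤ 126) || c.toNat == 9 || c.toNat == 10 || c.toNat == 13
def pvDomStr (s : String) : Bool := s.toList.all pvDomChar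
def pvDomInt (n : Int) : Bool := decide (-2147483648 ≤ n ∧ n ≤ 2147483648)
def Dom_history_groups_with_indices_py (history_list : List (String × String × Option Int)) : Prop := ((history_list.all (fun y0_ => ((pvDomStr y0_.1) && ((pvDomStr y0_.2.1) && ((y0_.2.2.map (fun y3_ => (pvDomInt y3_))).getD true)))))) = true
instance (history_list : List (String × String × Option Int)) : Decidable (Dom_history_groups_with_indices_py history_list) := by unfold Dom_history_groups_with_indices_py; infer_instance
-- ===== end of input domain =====

-- B replaces A's accumulator loop by a recursive split-at-next-header decomposition (objective: alternative).
-- ===== PORT A =====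
-- loop body of A: state = (groups, current_group); entry[0] == "header" flushes current_group
def hgStep (st : List (List ((String × String × Option Int) × Int)) × List ((String × String × Option Int) × Int))
    (p : Int × (String × String × Option Int)) :
    List (List ((String × String × Option Int) × Int)) × List ((String × String × Option Int) × Int) :=
  if p.2.1 == "header" then
    ((if st.2 = [] then st.1 else st.1 ++ [st.2]), [(p.2, p.1)])
  else
    (st.1, st.2 ++ [(p.2, p.1)])

def history_groups_with_indices_py (history_list : List (String × String × Option Int)) :
    List (List ((String × String × Option Int) × Int)) :=
  let st := (PySem.List.enumerate history_list 0).foldl hgStep ([], [])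
  if st.2 = [] then st.1 else st.1 ++ [st.2]

-- ===== PORT B =====
-- _go: first pair opens a group; rest[:k] / rest[k:] with k = index of the first header
-- in rest are exactly takeWhile / dropWhile of the non-header predicate.
def hgGo (pairs : List ((String × String × Option Int) × Int)) :
    List (List ((String × String × Option Int) × Int)) :=
  match pairs with
  | [] => []
  | p :: rest =>
      (p :: rest.takeWhile (fun q => !(q.1.1 == "header"))) ::
        hgGo (rest.dropWhile (fun q => !(q.1.1 == "header")))
termination_by pairs.length
decreasing_by
  simpa using Nat.lt_succ_of_le (List.length_dropWhile_le _ _)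

def history_groups_with_indices_py_alt (history_list : List (String × String × Option Int)) :
    List (List ((String × String × Option Int) × Int)) :=
  hgGo ((PySem.List.enumerate history_list 0).map (fun q => (q.2, q.1)))

-- ===== PRECONDITION & SPEC =====
def Spec_history_groups_with_indices_py (history_list : List (String × String × Option Int)) (out : List (List ((String × String × Option Int) × Int))) : Prop := out = history_groups_with_indices_py_alt history_list
instance (history_list : List (String × String × Option Int)) (out : List (List ((String × String × Option Int) × Int))) : Decidable (Spec_history_groups_with_indices_py history_list out) := by unfold Spec_history_groups_with_indices_py; infer_instance

-- ===== CLAIM (what is proved, stated in full; the proofs are below) =====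
def Claim_equal_history_groups_with_indices_py : Prop := ∀ (history_list : List (String × String × Option Int)), Dom_history_groups_with_indices_py history_list → Spec_history_groups_with_indices_py history_list (history_groups_with_indices_py history_list)

-- ===== LEMMAS AND PROOFS =====

theorem hgGo_cons (p : (String × String × Option Int) × Int)
    (rest : List ((String × String × Option Int) × Int)) :
    hgGo (p :: rest) =
      (p :: rest.takeWhile (fun q => !(q.1.1 == "header"))) ::
        hgGo (rest.dropWhile (fun q => !(q.1.1 == "header"))) := by
  rw [hgGo]

-- loop invariant: finalizing A's fold from a nonempty current group yields the groups so far
-- followed by the current group extended to the next header, then B's recursion on the rest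
theorem hgFold_eq (ps : List (Int × (String × String × Option Int)))
    (gs : List (List ((String × String × Option Int) × Int)))
    (cur : List ((String × String × Option Int) × Int)) (hcur : cur ≠ []) :
    (let st := ps.foldl hgStep (gs, cur);
     if st.2 = [] then st.1 else st.1 ++ [st.2]) =
      gs ++ (cur ++ (ps.map (fun q => (q.2, q.1))).takeWhile (fun q => !(q.1.1 == "header"))) ::
        hgGo ((ps.map (fun q => (q.2, q.1))).dropWhile (fun q => !(q.1.1 == "header"))) := by
  induction ps generalizing gs cur with
  | nil => simp [hgGo, hcur]
  | cons p rest ih =>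
    by_cases h : p.2.1 = "header"
    · have : hgStep (gs, cur) p = (gs ++ [cur], [(p.2, p.1)]) := by
        simp [hgStep, h, hcur]
      simp only [List.foldl_cons, this, List.map_cons, List.takeWhile_cons,
        List.dropWhile_cons, h]
      rw [ih _ _ (by simp)]
      simp [hgGo_cons]
    · have : hgStep (gs, cur) p = (gs, cur ++ [(p.2, p.1)]) := by
        simp [hgStep, h]
      simp only [List.foldl_cons, this, List.map_cons, List.takeWhile_cons,
        List.dropWhile_cons]
      rw [ih _ _ (by simp)]
      simp [h]

-- ===== VERDICT (by name: the statement is the Claim_ definition above) =====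
theorem history_groups_with_indices_py_spec : Claim_equal_history_groups_with_indices_py := by
  intro hl _
  unfold Spec_history_groups_with_indices_py history_groups_with_indices_py
    history_groups_with_indices_py_alt
  cases hl with
  | nil => simp [PySem.List.enumerate, hgGo]
  | cons x xs =>
    rw [PySem.List.enumerate_cons]
    have hstep : hgStep (([] : List (List ((String × String × Option Int) × Int))), []) (0, x)
        = ([], [(x, 0)]) := by
      by_cases h : x.1 = "header" <;> simp [hgStep, h]
    simp only [List.foldl_cons, hstep]
    rw [hgFold_eq _ _ _ (by simp)]
    simp [hgGo_cons]
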